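-- pv_equiv track=rewrite | github.com/PLSE-Lab/Python-MLAPI-expl | python_sources/python-ngram-include-test-data.py | predict_ngram_pred
-- ===== SOURCE A (Python) =====
-- def predict_ngram_pred(input_lists, ngram_table, ngram_n):
--     predicts = list()
--
--     for l in input_lists:
--         if len(l) < ngram_n:
--             predicts.append(None)
--         else:
--             ngram_key = tuple(l[-ngram_n:])
--             pred = ngram_table.get(ngram_key)
--             if pred:
--                 max_occur_count = 0
--                 max_occur = None
--                 for c, count in pred.items():
--                     if count > max_occur_count:
--                         max_occur = c
--                         max_occur_count = count
--                 predicts.append(max_occur)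
--             else:
--                 predicts.append(None)
--
--     return predicts
-- ===== SOURCE B (Python) =====
-- def _best(counts):
--     # first token achieving the strict maximum count, None unless some count > 0
--     m = max(counts.values(), default=0)
--     if m <= 0:
--         return None
--     return next(c for c, v in counts.items() if v == m)
--
--
-- def predict_ngram_pred(input_lists, ngram_table, ngram_n):
--     best = {key: _best(counts) for key, counts in ngram_table.items()}
--     return [None if len(l) < ngram_n else best.get(tuple(l[-ngram_n:]))
--             for l in input_lists]
-- ===== Notes on version B (the rewrite author's own statement) =====
-- stated objective: alternative
-- what changed: B precomputes, in one pass over ngram_table, a dict mapping each key to its best next token (first strict-max token, None if no positive count), so the per-query loop is a plain dict lookup instead of an argmax scan.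
import Mathlib
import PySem

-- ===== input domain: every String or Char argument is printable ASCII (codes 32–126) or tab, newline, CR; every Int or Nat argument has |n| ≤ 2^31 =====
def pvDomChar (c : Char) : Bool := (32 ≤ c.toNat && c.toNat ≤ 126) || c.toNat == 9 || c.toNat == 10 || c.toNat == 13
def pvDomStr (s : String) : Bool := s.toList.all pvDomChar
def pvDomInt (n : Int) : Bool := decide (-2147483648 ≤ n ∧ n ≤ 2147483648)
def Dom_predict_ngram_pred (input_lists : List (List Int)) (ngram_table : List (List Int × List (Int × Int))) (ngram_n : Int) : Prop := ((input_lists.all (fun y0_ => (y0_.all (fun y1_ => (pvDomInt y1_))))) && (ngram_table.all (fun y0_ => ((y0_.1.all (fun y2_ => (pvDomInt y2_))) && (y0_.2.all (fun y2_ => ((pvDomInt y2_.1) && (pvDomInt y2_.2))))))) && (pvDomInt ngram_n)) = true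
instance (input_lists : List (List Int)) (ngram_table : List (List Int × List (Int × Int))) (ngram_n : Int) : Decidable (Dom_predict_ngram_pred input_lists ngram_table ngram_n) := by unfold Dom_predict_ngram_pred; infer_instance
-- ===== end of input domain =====

-- B builds a one-time best-token index over ngram_table instead of an argmax scan per query (alternative decomposition).

-- ===== PORT A =====
-- ngram_table is a Python dict (unique keys); its '.get(key)' is the first match in the association list.
def predict_ngram_pred (input_lists : List (List Int)) (ngram_table : List (List Int × List (Int × Int))) (ngram_n : Int) : List (Option Int) :=
  input_lists.foldl (fun predicts l =>
    if (l.length : Int) < ngram_n then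
      predicts ++ [none]
    else
      let ngram_key := PySem.List.slice l (some (-ngram_n)) none
      match (ngram_table.find? (fun kv => kv.1 == ngram_key)).map (fun kv => kv.2) with
      | some pred =>
        if pred ≠ [] then   -- `if pred:` — a dict is truthy iff non-empty
          predicts ++ [(pred.foldl
              (fun st cp => if cp.2 > st.2 then (some cp.1, cp.2) else st)
              ((none : Option Int), (0 : Int))).1]
        else predicts ++ [none]
      | none => predicts ++ [none]) []

-- ===== PORT B =====
-- port of Source B's _best: max(counts.values(), default=0), then first token with that count
def pvBest (counts : List (Int × Int)) : Option Int :=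
  let m := (PySem.List.max? (counts.map (fun p => p.2)) (fun x => x)).getD 0
  if m ≤ 0 then none
  else (counts.find? (fun p => p.2 == m)).map (fun p => p.1)

-- dict comprehension over ngram_table's items = map (unique keys); best.get(key) = first match, None-flattened
def predict_ngram_pred_alt (input_lists : List (List Int)) (ngram_table : List (List Int × List (Int × Int))) (ngram_n : Int) : List (Option Int) :=
  let best := ngram_table.map (fun kc => (kc.1, pvBest kc.2))
  input_lists.map (fun l =>
    if (l.length : Int) < ngram_n then none
    else ((best.find? (fun kv => kv.1 == PySem.List.slice l (some (-ngram_n)) none)).map (fun kv => kv.2)).join)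

-- ===== PRECONDITION & SPEC =====
def Spec_predict_ngram_pred (input_lists : List (List Int)) (ngram_table : List (List Int × List (Int × Int))) (ngram_n : Int) (out : List (Option Int)) : Prop := out = predict_ngram_pred_alt input_lists ngram_table ngram_n
instance (input_lists : List (List Int)) (ngram_table : List (List Int × List (Int × Int))) (ngram_n : Int) (out : List (Option Int)) : Decidable (Spec_predict_ngram_pred input_lists ngram_table ngram_n out) := by unfold Spec_predict_ngram_pred; infer_instance

-- ===== CLAIM (what is proved, stated in full; the proofs are below) =====
def Claim_equal_predict_ngram_pred : Prop := ∀ (input_lists : List (List Int)) (ngram_table : List (List Int × List (Int × Int))) (ngram_n : Int), Dom_predict_ngram_pred input_lists ngram_table ngram_n → Spec_predict_ngram_pred input_lists ngram_table ngram_n (predict_ngram_pred input_lists ngram_table ngram_n)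

-- ===== LEMMAS AND PROOFS =====

-- characterisation of A's running-argmax loop
theorem argmax_fold_char (pred : List (Int × Int)) : ∀ (o : Option Int) (m : Int),
    pred.foldl (fun st cp => if cp.2 > st.2 then (some cp.1, cp.2) else st) (o, m)
      = (if (pred.map (fun p => p.2)).foldl max m ≤ m then (o, m)
         else ((pred.find? (fun p => p.2 == (pred.map (fun p => p.2)).foldl max m)).map (fun p => p.1),
               (pred.map (fun p => p.2)).foldl max m)) := by
  induction pred with
  | nil => intro o m; simp
  | cons p t ih =>
    intro o m
    have hM : ∀ a : Int, a ≤ (t.map (fun p => p.2)).foldl max a := by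
      intro a
      exact (PySem.List.le_foldl_max (t.map (fun p => p.2)) a).1
    simp only [List.foldl_cons, List.map_cons]
    by_cases hp : p.2 > m
    · rw [if_pos hp, ih]
      have hmax : max m p.2 = p.2 := by omega
      rw [hmax]
      have hge : p.2 ≤ (t.map (fun p => p.2)).foldl max p.2 := hM p.2
      by_cases hle : (t.map (fun p => p.2)).foldl max p.2 ≤ p.2
      · have heq : (t.map (fun p => p.2)).foldl max p.2 = p.2 := le_antisymm hle hge
        rw [if_pos hle, heq, if_neg (by omega), List.find?_cons]
        simp
      · rw [if_neg hle, if_neg (by omega), List.find?_cons]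
        have hne : (p.2 == (t.map (fun p => p.2)).foldl max p.2) = false := by
          simp; omega
        rw [hne]
    · rw [if_neg hp]
      have hmax : max m p.2 = m := by omega
      rw [ih, hmax]
      by_cases hle : (t.map (fun p => p.2)).foldl max m ≤ m
      · rw [if_pos hle, if_pos hle]
      · rw [if_neg hle, if_neg hle, List.find?_cons]
        have hne : (p.2 == (t.map (fun p => p.2)).foldl max m) = false := by
          simp; omega
        rw [hne]

-- per-counts-dict agreement: A's argmax branch equals pvBest
theorem elem_eq (pred : List (Int × Int)) :
    (if pred ≠ [] then
        some ((pred.foldl (fun st cp => if cp.2 > st.2 then (some cp.1, cp.2) else st)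
                ((none : Option Int), (0 : Int))).1)
      else some none).join = pvBest pred := by
  cases pred with
  | nil => simp [pvBest, PySem.List.max?]
  | cons c t =>
    simp only [ne_eq, reduceCtorEq, not_false_eq_true, if_pos, Option.join_some]
    rw [argmax_fold_char]
    unfold pvBest
    rw [List.map_cons, PySem.List.max?_id_cons]
    simp only [Option.getD_some, List.foldl_cons]
    have hassoc : (t.map (fun p => p.2)).foldl max (max 0 c.2)
        = max 0 ((t.map (fun p => p.2)).foldl max c.2) := by
      induction t generalizing c with
      | nil => simp
      | cons d t' ih' =>
        simp only [List.map_cons, List.foldl_cons]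
        rw [max_assoc]
        exact ih' (c.1, max c.2 d.2)
    rw [hassoc]
    by_cases h : (t.map (fun p => p.2)).foldl max c.2 ≤ 0
    · rw [if_pos (by omega), if_pos h]
    · rw [if_neg (by omega), if_neg h]
      have : max 0 ((t.map (fun p => p.2)).foldl max c.2)
          = (t.map (fun p => p.2)).foldl max c.2 := by omega
      rw [this]

-- looking up in the mapped table = mapping the lookup
theorem find_map_eq (ngram_table : List (List Int × List (Int × Int))) (key : List Int) :
    ((ngram_table.map (fun kc => (kc.1, pvBest kc.2))).find? (fun kv => kv.1 == key))
      = (ngram_table.find? (fun kv => kv.1 == key)).map (fun kc => (kc.1, pvBest kc.2)) := by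
  rw [List.find?_map]
  rfl

-- ===== VERDICT (by name: the statement is the Claim_ definition above) =====
theorem predict_ngram_pred_spec : Claim_equal_predict_ngram_pred := by
  intro input_lists ngram_table ngram_n _
  unfold Spec_predict_ngram_pred predict_ngram_pred predict_ngram_pred_alt
  have hbody : (fun (predicts : List (Option Int)) (l : List Int) =>
      if (l.length : Int) < ngram_n then
        predicts ++ [none]
      else
        let ngram_key := PySem.List.slice l (some (-ngram_n)) none
        match (ngram_table.find? (fun kv => kv.1 == ngram_key)).map (fun kv => kv.2) with
        | some pred =>
          if pred ≠ [] then
            predicts ++ [(pred.foldl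
                (fun st cp => if cp.2 > st.2 then (some cp.1, cp.2) else st)
                ((none : Option Int), (0 : Int))).1]
          else predicts ++ [none]
        | none => predicts ++ [none])
      = (fun (predicts : List (Option Int)) (l : List Int) => predicts ++
          [if (l.length : Int) < ngram_n then none
           else (((ngram_table.map (fun kc => (kc.1, pvBest kc.2))).find?
                    (fun kv => kv.1 == PySem.List.slice l (some (-ngram_n)) none)).map
                  (fun kv => kv.2)).join]) := by
    funext predicts l
    by_cases hlen : (l.length : Int) < ngram_n
    · simp [hlen]
    · rw [if_neg hlen, if_neg hlen, find_map_eq]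
      cases hfind : ngram_table.find? (fun kv => kv.1 == PySem.List.slice l (some (-ngram_n)) none) with
      | none => simp [hfind]
      | some kc =>
        simp only [Option.map_some]
        rw [← elem_eq kc.2]
        cases h : decide (kc.2 ≠ []) <;> simp_all
  rw [hbody, PySem.List.foldl_append_singleton_eq_map]
  simp
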